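-- pv_equiv track=rewrite | github.com/NiramBtw/project_eule | Problem 39 - Integer right triangles.py | Get_rightAngle_triangles_byPerimeter
-- ===== SOURCE A (Python) =====
-- def Set_powers(array):
--     for i in range(len(array)):
--         array[i] = i * i
--
-- def Get_rightAngle_triangles_byPerimeter(perimeter_limit):
--     powers = [0] * (perimeter_limit + 1)
--     Set_powers(powers)
--     perimeter_solutions = [[] for i in range(perimeter_limit + 1)]
--     for p in range(3, perimeter_limit, 1):
--         for c in range(1, p, 1):
--             for a in range(1, c, 1):
--                 b = p - (a + c)
--                 if a + b <= c:
--                     continue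
--                 if powers[a] + powers[b] == powers[c]:
--                     perimeter_solutions[p].append((a, b, c))
--     return perimeter_solutions
-- ===== SOURCE B (Python) =====
-- def Get_rightAngle_triangles_byPerimeter(perimeter_limit):
--     buckets = [[] for _ in range(perimeter_limit + 1)]
--     roots = {i * i: i for i in range(1, perimeter_limit)}
--     for c in range(1, perimeter_limit):
--         cc = c * c
--         for a in range(1, c):
--             b = roots.get(cc - a * a)
--             if b is None:
--                 continue
--             p = a + b + c
--             if p < perimeter_limit:
--                 buckets[p].append((a, b, c))
--     return buckets
-- ===== Notes on version B (the rewrite author's own statement) =====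
-- stated objective: faster
-- what changed: Instead of testing every (p,c,a) triple cubically, B builds a square-root dictionary once, enumerates only (c,a) pairs, finds b by one dict lookup and buckets the triple at perimeter a+b+c, producing each bucket in the same (c asc, a asc) order.
import Mathlib
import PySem

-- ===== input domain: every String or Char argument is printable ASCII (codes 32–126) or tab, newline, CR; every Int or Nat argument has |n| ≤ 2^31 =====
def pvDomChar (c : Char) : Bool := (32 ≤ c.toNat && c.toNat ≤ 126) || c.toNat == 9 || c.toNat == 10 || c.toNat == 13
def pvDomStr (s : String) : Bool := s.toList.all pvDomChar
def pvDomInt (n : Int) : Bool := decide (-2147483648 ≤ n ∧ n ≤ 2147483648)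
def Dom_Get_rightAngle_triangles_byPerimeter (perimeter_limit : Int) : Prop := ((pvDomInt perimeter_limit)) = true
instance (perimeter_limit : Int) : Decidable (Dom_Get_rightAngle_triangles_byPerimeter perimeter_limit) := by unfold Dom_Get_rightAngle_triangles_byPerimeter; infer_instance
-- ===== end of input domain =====

-- B replaces A's cubic scan over (p,c,a) by a quadratic scan over (c,a) with a square-root dictionary; same buckets, proved equal.

-- ===== PORT A =====
-- `buckets[i].append(x)` (i is nonnegative and in range whenever this line runs in either Python, so set/getD are exact here)
def pvAppendAt (bs : List (List (Int × Int × Int))) (i : Int) (x : Int × Int × Int) : List (List (Int × Int × Int)) :=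
  bs.set i.toNat (PySem.List.pyGetD bs i [] ++ [x])

-- `for i in range(len(array)): array[i] = i * i`  (mutation ported as returning the updated list)
def Set_powers (array : List Int) : List Int :=
  (List.range array.length).foldl (fun arr i => arr.set i ((i : Int) * (i : Int))) array

def Get_rightAngle_triangles_byPerimeter (perimeter_limit : Int) : List (List (Int × Int × Int)) :=
  let powers := Set_powers (List.replicate (perimeter_limit + 1).toNat 0)
  let perimeter_solutions : List (List (Int × Int × Int)) := List.replicate (perimeter_limit + 1).toNat []
  (PySem.List.pyRange 3 perimeter_limit 1).foldl (fun sols p =>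
    (PySem.List.pyRange 1 p 1).foldl (fun sols c =>
      (PySem.List.pyRange 1 c 1).foldl (fun sols a =>
        let b := p - (a + c)
        if a + b ≤ c then sols
        else if PySem.List.pyGetD powers a 0 + PySem.List.pyGetD powers b 0 = PySem.List.pyGetD powers c 0 then
          pvAppendAt sols p (a, b, c)
        else sols) sols) sols) perimeter_solutions

-- ===== PORT B =====
-- `buckets[p].append(x)` in B (p = a + b + c ≥ 3 and in range whenever this line runs)
def pvAppendAlt (bs : List (List (Int × Int × Int))) (i : Int) (x : Int × Int × Int) : List (List (Int × Int × Int)) :=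
  bs.set i.toNat (PySem.List.pyGetD bs i [] ++ [x])

-- `roots = {i * i: i for i in range(1, perimeter_limit)}`
def pvRoots (perimeter_limit : Int) : PySem.Dict Int Int :=
  (PySem.List.pyRange 1 perimeter_limit 1).foldl (fun d i => d.insert (i * i) i) PySem.Dict.empty

def Get_rightAngle_triangles_byPerimeter_alt (perimeter_limit : Int) : List (List (Int × Int × Int)) :=
  let buckets : List (List (Int × Int × Int)) := List.replicate (perimeter_limit + 1).toNat []
  let roots := pvRoots perimeter_limit
  (PySem.List.pyRange 1 perimeter_limit 1).foldl (fun buckets c =>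
    let cc := c * c
    (PySem.List.pyRange 1 c 1).foldl (fun buckets a =>
      match roots.get? (cc - a * a) with
      | none => buckets
      | some b =>
        let p := a + b + c
        if p < perimeter_limit then pvAppendAlt buckets p (a, b, c) else buckets) buckets) buckets

-- ===== PRECONDITION & SPEC =====
def Spec_Get_rightAngle_triangles_byPerimeter (perimeter_limit : Int) (out : List (List (Int × Int × Int))) : Prop := out = Get_rightAngle_triangles_byPerimeter_alt perimeter_limit
instance (perimeter_limit : Int) (out : List (List (Int × Int × Int))) : Decidable (Spec_Get_rightAngle_triangles_byPerimeter perimeter_limit out) := by unfold Spec_Get_rightAngle_triangles_byPerimeter; infer_instance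

-- ===== CLAIM (what is proved, stated in full; the proofs are below) =====
def Claim_equal_Get_rightAngle_triangles_byPerimeter : Prop := ∀ (perimeter_limit : Int), Dom_Get_rightAngle_triangles_byPerimeter perimeter_limit → Spec_Get_rightAngle_triangles_byPerimeter perimeter_limit (Get_rightAngle_triangles_byPerimeter perimeter_limit)

-- ===== LEMMAS AND PROOFS =====

-- Nat-index form of the bucket append
def pvAppN (bs : List (List (Int × Int × Int))) (i : Nat) (x : Int × Int × Int) : List (List (Int × Int × Int)) :=
  bs.set i (bs.getD i [] ++ [x])

lemma pvAppendAt_eq (bs : List (List (Int × Int × Int))) (i : Int) (x : Int × Int × Int) (h : 0 ≤ i) :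
    pvAppendAt bs i x = pvAppN bs i.toNat x := by
  simp [pvAppendAt, pvAppN, PySem.List.pyGetD_of_nonneg bs [] h]

lemma pvAppendAlt_eq (bs : List (List (Int × Int × Int))) (i : Int) (x : Int × Int × Int) (h : 0 ≤ i) :
    pvAppendAlt bs i x = pvAppN bs i.toNat x := by
  simp [pvAppendAlt, pvAppN, PySem.List.pyGetD_of_nonneg bs [] h]

lemma pvAppN_length (bs : List (List (Int × Int × Int))) (i : Nat) (x : Int × Int × Int) :
    (pvAppN bs i x).length = bs.length := by simp [pvAppN]

lemma pvAppN_getD (bs : List (List (Int × Int × Int))) (i : Nat) (x : Int × Int × Int) (j : Nat)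
    (hi : i < bs.length) :
    (pvAppN bs i x).getD j [] = if i = j then bs.getD j [] ++ [x] else bs.getD j [] := by
  simp only [pvAppN, List.getD_eq_getElem?_getD, List.getElem?_set, hi, if_true]
  by_cases h : i = j <;> simp [h]

-- generic "bucketed append" loop step
def pvBStep {σ : Type} (g : σ → Option (Nat × (Int × Int × Int)))
    (bs : List (List (Int × Int × Int))) (s : σ) : List (List (Int × Int × Int)) :=
  match g s with
  | none => bs
  | some (i, x) => pvAppN bs i x

-- selector: the element a stream item contributes to bucket j, if any
def pvSel {σ : Type} (j : Nat) (g : σ → Option (Nat × (Int × Int × Int))) (s : σ) : Option (Int × Int × Int) :=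
  match g s with
  | some (i, x) => if i = j then some x else none
  | none => none

lemma pvFoldBucket_len {σ : Type} (l : List σ) (g : σ → Option (Nat × (Int × Int × Int)))
    (bs : List (List (Int × Int × Int))) : (l.foldl (pvBStep g) bs).length = bs.length := by
  induction l generalizing bs with
  | nil => rfl
  | cons s l ih =>
      simp only [List.foldl_cons]
      rw [ih]
      unfold pvBStep
      cases h : g s with
      | none => rfl
      | some p => cases p with | mk i x => exact pvAppN_length bs i x

lemma pvFoldBucket_getD {σ : Type} (l : List σ) (g : σ → Option (Nat × (Int × Int × Int)))
    (bs : List (List (Int × Int × Int)))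
    (hg : ∀ s ∈ l, ∀ i x, g s = some (i, x) → i < bs.length) (j : Nat) :
    (l.foldl (pvBStep g) bs).getD j [] = bs.getD j [] ++ l.filterMap (pvSel j g) := by
  induction l generalizing bs with
  | nil => simp
  | cons s l ih =>
      simp only [List.foldl_cons, List.filterMap_cons]
      cases h : g s with
      | none =>
          rw [show pvBStep g bs s = bs by simp [pvBStep, h]]
          rw [ih bs (fun t ht i x hx => hg t (List.mem_cons_of_mem s ht) i x hx)]
          simp [pvSel, h]
      | some p =>
          cases p with
          | mk i x =>
            have hi : i < bs.length := hg s (List.mem_cons_self ..) i x h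
            have hstep : pvBStep g bs s = pvAppN bs i x := by simp [pvBStep, h]
            rw [hstep]
            rw [ih (pvAppN bs i x) (fun t ht i' x' hx => by
              rw [pvAppN_length]; exact hg t (List.mem_cons_of_mem s ht) i' x' hx)]
            rw [pvAppN_getD bs i x j hi]
            simp only [pvSel, h]
            by_cases hij : i = j <;> simp [hij]

-- a nested for-loop is a fold over the flattened pair stream
lemma pvFoldlNested {β γ δ : Type} (l : List β) (g : β → List γ) (step : δ → β → γ → δ) (init : δ) :
    l.foldl (fun acc x => (g x).foldl (fun acc y => step acc x y) acc) init
      = (l.flatMap (fun x => (g x).map (fun y => (x, y)))).foldl (fun acc s => step acc s.1 s.2) init := by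
  induction l generalizing init with
  | nil => rfl
  | cons x l ih => simp [List.foldl_append, List.foldl_map, ih]

-- a flatMap all of whose pieces but one are empty
lemma pvFlatMapSingle {β γ : Type} (l : List β) (F : β → List γ) (x : β)
    (hnd : l.Nodup) (hx : x ∈ l) (h : ∀ y ∈ l, y ≠ x → F y = []) : l.flatMap F = F x := by
  induction l with
  | nil => cases hx
  | cons y l ih =>
      rcases List.mem_cons.mp hx with hyx | hxl
      · subst hyx
        have : l.flatMap F = [] := List.flatMap_eq_nil_iff.mpr (fun z hz =>
          h z (List.mem_cons_of_mem _ hz) (fun hzx => (List.nodup_cons.mp hnd).1 (hzx ▸ hz)))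
        simp [this]
      · have hyx : y ≠ x := fun hyx => (List.nodup_cons.mp hnd).1 (hyx ▸ hxl)
        rw [List.flatMap_cons, h y (List.mem_cons_self ..) hyx,
          ih (List.nodup_cons.mp hnd).2 hxl (fun z hz => h z (List.mem_cons_of_mem _ hz))]
        rfl

-- the Set_powers loop, elementwise
lemma pvSetFold_getElem? (k : Nat) (xs : List Int) (j : Nat) :
    ((List.range k).foldl (fun arr i => arr.set i ((i : Int) * (i : Int))) xs)[j]? =
      if j < k ∧ j < xs.length then some ((j : Int) * (j : Int)) else xs[j]? := by
  induction k with
  | zero => simp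
  | succ k ih =>
      have hlen : ∀ (m : Nat), ((List.range m).foldl (fun arr i => arr.set i ((i : Int) * (i : Int))) xs).length = xs.length := by
        intro m
        induction m with
        | zero => rfl
        | succ m ihm => simp [List.range_succ, List.foldl_append, ihm]
      simp only [List.range_succ, List.foldl_append, List.foldl_cons, List.foldl_nil]
      rw [List.getElem?_set]
      rw [hlen k]
      by_cases hkj : k = j
      · subst hkj
        by_cases hk : k < xs.length <;> simp [hk]
      · rw [if_neg hkj, ih]
        have hiff : (j < k ∧ j < xs.length) ↔ (j < k + 1 ∧ j < xs.length) := by omega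
        simp only [hiff]

lemma pvPowers_getD (L x : Int) (h0 : 0 ≤ x) (h1 : x < L + 1) :
    PySem.List.pyGetD (Set_powers (List.replicate (L + 1).toNat 0)) x 0 = x * x := by
  rw [PySem.List.pyGetD_of_nonneg _ 0 h0]
  unfold Set_powers
  have hx : x.toNat < (L + 1).toNat := by omega
  rw [List.getD_eq_getElem?_getD]
  simp only [List.length_replicate]
  rw [pvSetFold_getElem? (L + 1).toNat (List.replicate (L + 1).toNat 0) x.toNat]
  simp only [List.length_replicate, hx, and_self, if_true, Option.getD_some]
  have : ((x.toNat : Int)) = x := by omega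
  rw [this]

-- the square-root dictionary answers exactly the squares of 1 ≤ b < L
lemma pvRoots_some (L v b : Int) :
    (pvRoots L).get? v = some b ↔ 1 ≤ b ∧ b < L ∧ b * b = v := by
  unfold pvRoots
  have hsq : ∀ y ∈ PySem.List.pyRange 1 L 1, ∀ z ∈ PySem.List.pyRange 1 L 1, y * y = z * z → y = z := by
    intro y hy z hz h
    have hy1 := (PySem.List.mem_pyRange_one.mp hy).1
    have hz1 := (PySem.List.mem_pyRange_one.mp hz).1
    rcases mul_self_eq_mul_self_iff.mp h with h' | h' <;> omega
  have hnd : ((PySem.List.pyRange 1 L 1).map (fun i => i * i)).Nodup :=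
    (List.nodup_map_iff_inj_on (PySem.List.nodup_pyRange_one 1 L)).mpr hsq
  have hkeys : ((PySem.List.pyRange 1 L 1).foldl (fun d i => d.insert (i * i) i) (PySem.Dict.empty : PySem.Dict Int Int)).keys.Nodup :=
    PySem.Dict.nodup_keys_foldl_insert_key _ (fun i => i * i) (fun _ i => i) _ PySem.Dict.nodup_keys_empty
  rw [PySem.Dict.get?_eq_some_iff_mem_items _ _ _ hkeys]
  rw [PySem.Dict.items_foldl_insert_fresh (PySem.List.pyRange 1 L 1) (fun i => i * i) (fun i => i) PySem.Dict.empty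
    (fun a _ => PySem.Dict.contains_empty _) hnd]
  simp only [show (PySem.Dict.empty : PySem.Dict Int Int).items = [] from rfl, List.nil_append,
    List.mem_map, Prod.mk.injEq]
  constructor
  · rintro ⟨i, hi, hvi, hib⟩
    have := PySem.List.mem_pyRange_one.mp hi
    subst hib
    exact ⟨this.1, this.2, hvi⟩
  · rintro ⟨h1, h2, h3⟩
    exact ⟨b, PySem.List.mem_pyRange_one.mpr ⟨h1, h2⟩, h3, rfl⟩

-- the per-item contribution of A's flattened loop, s = ((p, c), a)
def pvGA (L : Int) (s : (Int × Int) × Int) : Option (Nat × (Int × Int × Int)) :=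
  if ¬(s.2 + (s.1.1 - (s.2 + s.1.2)) ≤ s.1.2) ∧
      PySem.List.pyGetD (Set_powers (List.replicate (L + 1).toNat 0)) s.2 0 +
        PySem.List.pyGetD (Set_powers (List.replicate (L + 1).toNat 0)) (s.1.1 - (s.2 + s.1.2)) 0 =
        PySem.List.pyGetD (Set_powers (List.replicate (L + 1).toNat 0)) s.1.2 0
  then some (s.1.1.toNat, (s.2, s.1.1 - (s.2 + s.1.2), s.1.2)) else none

-- the per-item contribution of B's flattened loop, s = (c, a)
def pvGB (L : Int) (s : Int × Int) : Option (Nat × (Int × Int × Int)) :=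
  match (pvRoots L).get? (s.1 * s.1 - s.2 * s.2) with
  | none => none
  | some b => if s.2 + b + s.1 < L then some ((s.2 + b + s.1).toNat, (s.2, b, s.1)) else none


-- flattened iteration streams of the two loops
def pvStreamA (L : Int) : List ((Int × Int) × Int) :=
  (PySem.List.pyRange 3 L 1).flatMap (fun p =>
    (PySem.List.pyRange 1 p 1).flatMap (fun c =>
      (PySem.List.pyRange 1 c 1).map (fun a => ((p, c), a))))

def pvStreamB (L : Int) : List (Int × Int) :=
  (PySem.List.pyRange 1 L 1).flatMap (fun c =>
    (PySem.List.pyRange 1 c 1).map (fun a => (c, a)))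

lemma pvMemStreamA (L : Int) (t : (Int × Int) × Int) (ht : t ∈ pvStreamA L) :
    3 ≤ t.1.1 ∧ t.1.1 < L ∧ 1 ≤ t.1.2 ∧ t.1.2 < t.1.1 ∧ 1 ≤ t.2 ∧ t.2 < t.1.2 := by
  simp only [pvStreamA, List.mem_flatMap, List.mem_map, PySem.List.mem_pyRange_one] at ht
  obtain ⟨p, hp, c, hc, a, ha, rfl⟩ := ht
  exact ⟨hp.1, hp.2, hc.1, hc.2, ha.1, ha.2⟩

lemma pvMemStreamB (L : Int) (t : Int × Int) (ht : t ∈ pvStreamB L) :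
    1 ≤ t.1 ∧ t.1 < L ∧ 1 ≤ t.2 ∧ t.2 < t.1 := by
  simp only [pvStreamB, List.mem_flatMap, List.mem_map, PySem.List.mem_pyRange_one] at ht
  obtain ⟨c, hc, a, ha, rfl⟩ := ht
  exact ⟨hc.1, hc.2, ha.1, ha.2⟩

-- the pointwise heart: for 1 ≤ a < c < j < L, 3 ≤ j, the two loops contribute
-- the same element (if any) to bucket j at (c, a)
lemma pvCore (L : Int) (j : Nat) (c a : Int) (hj3 : 3 ≤ (j : Int)) (hjL : (j : Int) < L)
    (hc1 : 1 ≤ c) (hcj : c < (j : Int)) (ha1 : 1 ≤ a) (hac : a < c) :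
    pvSel j (pvGB L) (c, a) = pvSel j (pvGA L) (((j : Int), c), a) := by
  unfold pvSel pvGB pvGA
  dsimp only
  by_cases hg : a + ((j : Int) - (a + c)) ≤ c
  · rw [if_neg (fun hcon => hcon.1 hg)]
    cases h : (pvRoots L).get? (c * c - a * a) with
    | none => rfl
    | some b =>
        obtain ⟨hb1, hbL, hbsq⟩ := (pvRoots_some L _ b).mp h
        have hq : a * a + b * b = c * c := by linarith
        have hcab : c < a + b := by nlinarith
        dsimp only
        by_cases hlt : a + b + c < L
        · rw [if_pos hlt]
          dsimp only
          rw [if_neg (by omega : ¬ (a + b + c).toNat = j)]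
        · rw [if_neg hlt]
  · have hb01 : 1 ≤ (j : Int) - (a + c) := by omega
    have hb0L : (j : Int) - (a + c) < L := by omega
    rw [pvPowers_getD L a (by omega) (by omega), pvPowers_getD L ((j : Int) - (a + c)) (by omega) (by omega),
      pvPowers_getD L c (by omega) (by omega)]
    by_cases he : a * a + ((j : Int) - (a + c)) * ((j : Int) - (a + c)) = c * c
    · have hroot : (pvRoots L).get? (c * c - a * a) = some ((j : Int) - (a + c)) :=
        (pvRoots_some L _ _).mpr ⟨hb01, hb0L, by linarith⟩
      rw [hroot, if_pos ⟨hg, he⟩]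
      dsimp only
      rw [if_pos (by omega : a + ((j : Int) - (a + c)) + c < L)]
      dsimp only
      rw [if_pos (by omega : (a + ((j : Int) - (a + c)) + c).toNat = j),
        if_pos (by omega : ((j : Int)).toNat = j)]
    · rw [if_neg (fun hcon => he hcon.2)]
      cases h : (pvRoots L).get? (c * c - a * a) with
      | none => rfl
      | some b =>
          obtain ⟨hb1, hbL, hbsq⟩ := (pvRoots_some L _ b).mp h
          dsimp only
          by_cases hlt : a + b + c < L
          · rw [if_pos hlt]
            dsimp only
            rw [if_neg (fun hij => he (by
              have hbj : b = (j : Int) - (a + c) := by omega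
              rw [← hbj]; linarith))]
          · rw [if_neg hlt]

lemma pvA_as_fold (L : Int) :
    Get_rightAngle_triangles_byPerimeter L =
      (pvStreamA L).foldl (pvBStep (pvGA L)) (List.replicate (L + 1).toNat []) := by
  unfold Get_rightAngle_triangles_byPerimeter
  simp only []
  rw [pvFoldlNested (PySem.List.pyRange 3 L 1) (fun p => PySem.List.pyRange 1 p 1)
      (fun sols p c => (PySem.List.pyRange 1 c 1).foldl (fun sols a =>
        if a + (p - (a + c)) ≤ c then sols
        else if PySem.List.pyGetD (Set_powers (List.replicate (L + 1).toNat 0)) a 0 +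
            PySem.List.pyGetD (Set_powers (List.replicate (L + 1).toNat 0)) (p - (a + c)) 0 =
            PySem.List.pyGetD (Set_powers (List.replicate (L + 1).toNat 0)) c 0 then
          pvAppendAt sols p (a, p - (a + c), c)
        else sols) sols) (List.replicate (L + 1).toNat [])]
  rw [pvFoldlNested ((PySem.List.pyRange 3 L 1).flatMap (fun p =>
        (PySem.List.pyRange 1 p 1).map (fun c => (p, c))))
      (fun s => PySem.List.pyRange 1 s.2 1)
      (fun sols s a =>
        if a + (s.1 - (a + s.2)) ≤ s.2 then sols
        else if PySem.List.pyGetD (Set_powers (List.replicate (L + 1).toNat 0)) a 0 +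
            PySem.List.pyGetD (Set_powers (List.replicate (L + 1).toNat 0)) (s.1 - (a + s.2)) 0 =
            PySem.List.pyGetD (Set_powers (List.replicate (L + 1).toNat 0)) s.2 0 then
          pvAppendAt sols s.1 (a, s.1 - (a + s.2), s.2)
        else sols) (List.replicate (L + 1).toNat [])]
  have hstream : ((PySem.List.pyRange 3 L 1).flatMap (fun p =>
        (PySem.List.pyRange 1 p 1).map (fun c => (p, c)))).flatMap
        (fun s => (PySem.List.pyRange 1 s.2 1).map (fun a => (s, a))) = pvStreamA L := by
    unfold pvStreamA
    rw [List.flatMap_assoc]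
    refine List.flatMap_congr (fun p _ => ?_)
    rw [List.flatMap_map]
  rw [hstream]
  refine PySem.List.foldl_congr_mem _ _ _ _ (fun acc t ht => ?_)
  obtain ⟨hp3, hpL, hc1, hcp, ha1, hac⟩ := pvMemStreamA L t ht
  unfold pvBStep pvGA
  by_cases hg : t.2 + (t.1.1 - (t.2 + t.1.2)) ≤ t.1.2
  · rw [if_pos hg, if_neg (by intro hcon; exact hcon.1 hg)]
  · rw [if_neg hg]
    by_cases he : PySem.List.pyGetD (Set_powers (List.replicate (L + 1).toNat 0)) t.2 0 +
        PySem.List.pyGetD (Set_powers (List.replicate (L + 1).toNat 0)) (t.1.1 - (t.2 + t.1.2)) 0 =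
        PySem.List.pyGetD (Set_powers (List.replicate (L + 1).toNat 0)) t.1.2 0
    · rw [if_pos he, if_pos ⟨hg, he⟩]
      exact pvAppendAt_eq acc t.1.1 _ (by omega)
    · rw [if_neg he, if_neg (by intro hcon; exact he hcon.2)]

lemma pvB_as_fold (L : Int) :
    Get_rightAngle_triangles_byPerimeter_alt L =
      (pvStreamB L).foldl (pvBStep (pvGB L)) (List.replicate (L + 1).toNat []) := by
  unfold Get_rightAngle_triangles_byPerimeter_alt
  simp only []
  rw [pvFoldlNested (PySem.List.pyRange 1 L 1) (fun c => PySem.List.pyRange 1 c 1)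
      (fun buckets c a =>
        match (pvRoots L).get? (c * c - a * a) with
        | none => buckets
        | some b => if a + b + c < L then pvAppendAlt buckets (a + b + c) (a, b, c) else buckets)
      (List.replicate (L + 1).toNat [])]
  refine PySem.List.foldl_congr_mem _ _ _ _ (fun acc t ht => ?_)
  obtain ⟨hc1, hcL, ha1, hac⟩ := pvMemStreamB L t ht
  unfold pvBStep pvGB
  cases h : (pvRoots L).get? (t.1 * t.1 - t.2 * t.2) with
  | none => rfl
  | some b =>
      obtain ⟨hb1, hbL, _⟩ := (pvRoots_some L _ b).mp h
      dsimp only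
      by_cases hlt : t.2 + b + t.1 < L
      · rw [if_pos hlt, if_pos hlt]
        exact pvAppendAlt_eq acc (t.2 + b + t.1) _ (by omega)
      · rw [if_neg hlt, if_neg hlt]

lemma pvLenA (L : Int) : (Get_rightAngle_triangles_byPerimeter L).length = (L + 1).toNat := by
  rw [pvA_as_fold, pvFoldBucket_len]; simp

lemma pvLenB (L : Int) : (Get_rightAngle_triangles_byPerimeter_alt L).length = (L + 1).toNat := by
  rw [pvB_as_fold, pvFoldBucket_len]; simp

-- A's selector contributes nothing to bucket j unless p hits j
lemma pvSelA_ne (L : Int) (j : Nat) (p c a : Int) (hne : ¬ p.toNat = j) :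
    pvSel j (pvGA L) ((p, c), a) = none := by
  unfold pvSel
  cases hga : pvGA L ((p, c), a) with
  | none => rfl
  | some q =>
      obtain ⟨i, x⟩ := q
      have hi : i = p.toNat := by
        unfold pvGA at hga
        split_ifs at hga with hcond
        simp only [Option.some.injEq, Prod.mk.injEq] at hga
        exact hga.1.symm
      dsimp only
      rw [if_neg (by omega : ¬ i = j)]

-- bucket j of A
lemma pvBucketA (L : Int) (j : Nat) :
    (Get_rightAngle_triangles_byPerimeter L).getD j [] =
      if 3 ≤ (j : Int) ∧ (j : Int) < L then
        (PySem.List.pyRange 1 (j : Int) 1).flatMap (fun c =>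
          (PySem.List.pyRange 1 c 1).filterMap (fun a => pvSel j (pvGA L) (((j : Int), c), a)))
      else [] := by
  rw [pvA_as_fold, pvFoldBucket_getD _ _ _ (fun t ht i x hix => by
    obtain ⟨hp3, hpL, _, _, _, _⟩ := pvMemStreamA L t ht
    have hi : i = t.1.1.toNat := by
      unfold pvGA at hix
      split_ifs at hix with hcond
      simp only [Option.some.injEq, Prod.mk.injEq] at hix
      exact hix.1.symm
    rw [hi, List.length_replicate]
    omega) j]
  have hrep : (List.replicate (L + 1).toNat ([] : List (Int × Int × Int))).getD j [] = [] := by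
    simp [List.getD_eq_getElem?_getD]
  rw [hrep, List.nil_append]
  unfold pvStreamA
  simp only [List.filterMap_flatMap, List.filterMap_map, Function.comp_def]
  by_cases hj : 3 ≤ (j : Int) ∧ (j : Int) < L
  · rw [if_pos hj]
    have hnil : ∀ p ∈ PySem.List.pyRange 3 L 1, p ≠ (j : Int) →
        (PySem.List.pyRange 1 p 1).flatMap (fun c =>
          (PySem.List.pyRange 1 c 1).filterMap (fun a => pvSel j (pvGA L) ((p, c), a))) = [] := by
      intro p hp hpj
      have hp := PySem.List.mem_pyRange_one.mp hp
      exact List.flatMap_eq_nil_iff.mpr (fun c _ => List.filterMap_eq_nil_iff.mpr (fun a _ =>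
        pvSelA_ne L j p c a (by omega)))
    rw [pvFlatMapSingle _ _ (j : Int) (PySem.List.nodup_pyRange_one 3 L)
      (PySem.List.mem_pyRange_one.mpr ⟨hj.1, hj.2⟩) hnil]
  · rw [if_neg hj]
    refine List.flatMap_eq_nil_iff.mpr (fun p hp => ?_)
    have hp := PySem.List.mem_pyRange_one.mp hp
    exact List.flatMap_eq_nil_iff.mpr (fun c _ => List.filterMap_eq_nil_iff.mpr (fun a _ =>
      pvSelA_ne L j p c a (by omega)))

-- bucket j of B equals bucket j of A
lemma pvBucketB (L : Int) (j : Nat) :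
    (Get_rightAngle_triangles_byPerimeter_alt L).getD j [] =
      if 3 ≤ (j : Int) ∧ (j : Int) < L then
        (PySem.List.pyRange 1 (j : Int) 1).flatMap (fun c =>
          (PySem.List.pyRange 1 c 1).filterMap (fun a => pvSel j (pvGA L) (((j : Int), c), a)))
      else [] := by
  have hGBfacts : ∀ (c a : Int) (i : Nat) (x : Int × Int × Int), pvGB L (c, a) = some (i, x) →
      ∃ b : Int, 1 ≤ b ∧ b < L ∧ b * b = c * c - a * a ∧ a + b + c < L ∧ i = (a + b + c).toNat := by
    intro c a i x h
    unfold pvGB at h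
    dsimp only at h
    cases hr : (pvRoots L).get? (c * c - a * a) with
    | none => rw [hr] at h; simp at h
    | some b =>
        rw [hr] at h
        dsimp only at h
        obtain ⟨hb1, hbL, hbsq⟩ := (pvRoots_some L _ b).mp hr
        by_cases hlt : a + b + c < L
        · rw [if_pos hlt] at h
          simp only [Option.some.injEq, Prod.mk.injEq] at h
          exact ⟨b, hb1, hbL, hbsq, hlt, h.1.symm⟩
        · rw [if_neg hlt] at h; simp at h
  rw [pvB_as_fold, pvFoldBucket_getD _ _ _ (fun t ht i x hix => by
    obtain ⟨hc1, hcL, ha1, hac⟩ := pvMemStreamB L t ht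
    obtain ⟨b, hb1, _, _, hlt, hi⟩ := hGBfacts t.1 t.2 i x hix
    rw [hi, List.length_replicate]
    omega) j]
  have hrep : (List.replicate (L + 1).toNat ([] : List (Int × Int × Int))).getD j [] = [] := by
    simp [List.getD_eq_getElem?_getD]
  rw [hrep, List.nil_append]
  unfold pvStreamB
  simp only [List.filterMap_flatMap, List.filterMap_map, Function.comp_def]
  have hnone : ∀ (c a : Int), 1 ≤ a → 1 ≤ c → ¬(3 ≤ (j : Int) ∧ (j : Int) < L ∧ c < (j : Int)) →
      pvSel j (pvGB L) (c, a) = none := by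
    intro c a ha1 hc1 hbad
    unfold pvSel
    cases hgb : pvGB L (c, a) with
    | none => rfl
    | some q =>
        cases q with
        | mk i x =>
            obtain ⟨b, hb1, hbL, _, hlt, hi⟩ := hGBfacts c a i x hgb
            dsimp only
            rw [if_neg (by omega : ¬ i = j)]
  by_cases hj : 3 ≤ (j : Int) ∧ (j : Int) < L
  · rw [if_pos hj]
    rw [PySem.List.pyRange_one_append 1 (j : Int) L (by omega) (by omega), List.flatMap_append]
    have htail : (PySem.List.pyRange (j : Int) L 1).flatMap (fun c =>
        (PySem.List.pyRange 1 c 1).filterMap (fun a => pvSel j (pvGB L) (c, a))) = [] := by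
      refine List.flatMap_eq_nil_iff.mpr (fun c hc => List.filterMap_eq_nil_iff.mpr (fun a ha => ?_))
      have hc := PySem.List.mem_pyRange_one.mp hc
      have ha := PySem.List.mem_pyRange_one.mp ha
      exact hnone c a ha.1 (by omega) (by omega)
    have hhead : (PySem.List.pyRange 1 (j : Int) 1).flatMap (fun c =>
        (PySem.List.pyRange 1 c 1).filterMap (fun a => pvSel j (pvGB L) (c, a))) =
        (PySem.List.pyRange 1 (j : Int) 1).flatMap (fun c =>
          (PySem.List.pyRange 1 c 1).filterMap (fun a => pvSel j (pvGA L) (((j : Int), c), a))) := by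
      refine List.flatMap_congr (fun c hc => List.filterMap_congr (fun a ha => ?_))
      have hc := PySem.List.mem_pyRange_one.mp hc
      have ha := PySem.List.mem_pyRange_one.mp ha
      exact pvCore L j c a hj.1 hj.2 hc.1 hc.2 ha.1 ha.2
    show (PySem.List.pyRange 1 (j : Int) 1).flatMap (fun c =>
        (PySem.List.pyRange 1 c 1).filterMap (fun a => pvSel j (pvGB L) (c, a))) ++
        (PySem.List.pyRange (j : Int) L 1).flatMap (fun c =>
          (PySem.List.pyRange 1 c 1).filterMap (fun a => pvSel j (pvGB L) (c, a))) = _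
    rw [htail, List.append_nil, hhead]
  · rw [if_neg hj]
    refine List.flatMap_eq_nil_iff.mpr (fun c hc => List.filterMap_eq_nil_iff.mpr (fun a ha => ?_))
    have hc := PySem.List.mem_pyRange_one.mp hc
    have ha := PySem.List.mem_pyRange_one.mp ha
    exact hnone c a ha.1 hc.1 (by omega)

-- ===== VERDICT (by name: the statement is the Claim_ definition above) =====
theorem Get_rightAngle_triangles_byPerimeter_spec : Claim_equal_Get_rightAngle_triangles_byPerimeter := by
  intro L _
  unfold Spec_Get_rightAngle_triangles_byPerimeter
  apply List.ext_getElem (by rw [pvLenA, pvLenB])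
  intro j h1 h2
  rw [← List.getD_eq_getElem _ [] h1, ← List.getD_eq_getElem _ [] h2, pvBucketA, pvBucketB]
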